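-- pv_equiv track=rewrite | github.com/norhap/enigma2 | lib/python/Components/Timezones.py | gmtSort
-- ===== SOURCE A (Python) =====
-- def gmtSort(zones):  # If the Zone starts with "GMT" then those Zones will be sorted in GMT order with GMT-14 first and GMT+12 last.
-- 	data = {}
-- 	for (zone, name) in zones:
-- 		if name.startswith("GMT"):
-- 			try:
-- 				key = int(name[4:])
-- 				key = (key * -1) + 15 if name[3:4] == "-" else key + 15
-- 				key = "GMT%02d" % key
-- 			except ValueError:
-- 				key = "GMT15"
-- 		else:
-- 			key = name
-- 		data[key] = (zone, name)
-- 	return [data[x] for x in sorted(data.keys())]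
-- ===== SOURCE B (Python) =====
-- def _gmtKey(name):
--     # same key computation as the original (incl. the ValueError -> "GMT15" branch)
--     if name.startswith("GMT"):
--         try:
--             key = int(name[4:])
--             key = (key * -1) + 15 if name[3:4] == "-" else key + 15
--             key = "GMT%02d" % key
--         except ValueError:
--             key = "GMT15"
--     else:
--         key = name
--     return key
--
--
-- def gmtSort(zones):  # If the Zone starts with "GMT" then those Zones will be sorted in GMT order with GMT-14 first and GMT+12 last.
--     triples = [(_gmtKey(name), zone, name) for zone, name in zones]
--     triples.sort(key=lambda t: t[0])  # stable: equal keys keep input order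
--     result = []
--     prev = None
--     for key, zone, name in triples:
--         if result and key == prev:
--             result[-1] = (zone, name)  # last occurrence of a key wins, like dict overwrite
--         else:
--             result.append((zone, name))
--         prev = key
--     return result
-- ===== Notes on version B (the rewrite author's own statement) =====
-- stated objective: alternative
-- what changed: Replaces the dict keyed by computed GMT key (last write wins, then sorted(keys) with per-key lookups) by a single stable sort of (key, zone, name) triples followed by one linear adjacency scan that overwrites the previous output entry within a run of equal keys.
import Mathlib
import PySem

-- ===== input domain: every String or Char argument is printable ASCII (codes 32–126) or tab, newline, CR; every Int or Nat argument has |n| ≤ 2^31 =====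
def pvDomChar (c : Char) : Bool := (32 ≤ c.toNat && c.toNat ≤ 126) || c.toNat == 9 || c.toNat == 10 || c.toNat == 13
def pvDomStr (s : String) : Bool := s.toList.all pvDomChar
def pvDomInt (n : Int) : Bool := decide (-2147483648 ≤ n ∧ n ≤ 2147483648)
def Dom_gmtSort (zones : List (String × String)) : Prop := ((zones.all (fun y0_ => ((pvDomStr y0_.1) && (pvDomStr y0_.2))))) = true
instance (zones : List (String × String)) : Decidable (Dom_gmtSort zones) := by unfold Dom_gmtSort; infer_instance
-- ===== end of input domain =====

-- B replaces A's dict (last write wins) + sorted(keys) + per-key lookups by one stable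
-- sort of (key, zone, name) triples and a linear adjacency scan (alternative, same cost).

-- ===== PORT A =====
-- "GMT%02d" % k : zero-pad to width 2 (only 0..9 gain a '0'; negatives are already ≥ 2 chars) — exact
def gmtFmt02 (k : Int) : String :=
  if 0 ≤ k ∧ k < 10 then "0" ++ PySem.Int.toStr k else PySem.Int.toStr k

-- the key computation shared by both Pythons (A inline, B as helper _gmtKey)
def gmtKey (name : String) : String :=
  if PySem.Str.startswith name "GMT" then
    match PySem.Int.ofStr? (PySem.Str.slice name (some 4) none) with   -- int(name[4:]); none = ValueError
    | some k =>
        let key : Int := if PySem.Str.slice name (some 3) (some 4) == "-" then k * -1 + 15 else k + 15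
        "GMT" ++ gmtFmt02 key
    | none => "GMT15"
  else name

def gmtSort (zones : List (String × String)) : List (String × String) :=
  let data : PySem.Dict String (String × String) :=
    zones.foldl (fun d p => d.insert (gmtKey p.2) (p.1, p.2)) PySem.Dict.empty
  -- data[x] for x drawn from data.keys never raises KeyError, so getD is exact here
  (PySem.List.sorted data.keys (fun k => k)).map (fun x => data.getD x ("", ""))

-- ===== PORT B =====
def gmtSort_alt (zones : List (String × String)) : List (String × String) :=
  let triples : List (String × String × String) := zones.map (fun p => (gmtKey p.2, p.1, p.2))
  let sortedT := PySem.List.sorted triples (fun t => t.1)     -- stable sort, key only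
  (sortedT.foldl
    (fun (st : List (String × String) × Option String) t =>
      if st.1 ≠ [] ∧ st.2 = some t.1 then (st.1.dropLast ++ [(t.2.1, t.2.2)], some t.1)
      else (st.1 ++ [(t.2.1, t.2.2)], some t.1))
    ([], none)).1

-- ===== PRECONDITION & SPEC =====
def Spec_gmtSort (zones : List (String × String)) (out : List (String × String)) : Prop := out = gmtSort_alt zones
instance (zones : List (String × String)) (out : List (String × String)) : Decidable (Spec_gmtSort zones out) := by unfold Spec_gmtSort; infer_instance

-- ===== CLAIM (what is proved, stated in full; the proofs are below) =====
def Claim_equal_gmtSort : Prop := ∀ (zones : List (String × String)), Dom_gmtSort zones → Spec_gmtSort zones (gmtSort zones)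

-- ===== LEMMAS AND PROOFS =====

-- abbreviations used only by the proofs
def pvKf (p : String × String) : String := gmtKey p.2
def pvG (p : String × String) : String × String × String := (pvKf p, p)
def pvStep (st : List (String × String) × Option String) (t : String × String × String) :
    List (String × String) × Option String :=
  if st.1 ≠ [] ∧ st.2 = some t.1 then (st.1.dropLast ++ [(t.2.1, t.2.2)], some t.1)
  else (st.1 ++ [(t.2.1, t.2.2)], some t.1)
def pvF (l : List (String × String × String)) (k : String) : String × String :=
  (((l.filter (fun t => t.1 == k)).getLast?).map (·.2)).getD ("", "")
def pvSpec (l : List (String × String × String)) : List (String × String) :=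
  (PySem.List.dedup (l.map (·.1))).map (pvF l)

theorem pv_alt_eq (zones : List (String × String)) :
    gmtSort_alt zones =
      ((PySem.List.sorted (zones.map pvG) (fun t => t.1)).foldl pvStep ([], none)).1 := rfl

-- last-of-filter = reverse find
theorem pv_findrev {α : Type} (p : α → Bool) (l : List α) :
    l.reverse.find? p = (l.filter p).getLast? := by
  induction l using List.reverseRecOn with
  | nil => simp
  | append_singleton l x ih =>
    rw [List.reverse_append, List.filter_append]
    simp only [List.reverse_singleton, List.singleton_append, List.find?_cons,
      List.filter_singleton]
    cases hx : p x with
    | true =>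
      show some x = (List.filter p l ++ [x]).getLast?
      rw [List.getLast?_concat]
    | false =>
      show List.find? p l.reverse = (List.filter p l ++ []).getLast?
      rw [List.append_nil]
      exact ih

-- getD of A's insert loop is the last matching pair
theorem pv_getD_foldl (l : List (String × String)) (d : PySem.Dict String (String × String)) (k : String) :
    (l.foldl (fun d p => d.insert (gmtKey p.2) (p.1, p.2)) d).getD k ("", "") =
      match l.reverse.find? (fun p => gmtKey p.2 == k) with
      | some p => p
      | none => d.getD k ("", "") := by
  induction l generalizing d with
  | nil => simp
  | cons x l ih =>
    simp only [List.foldl_cons]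
    rw [ih, List.reverse_cons, List.find?_append]
    cases hf : l.reverse.find? (fun p => gmtKey p.2 == k) with
    | some q => simp
    | none =>
      simp only [Option.none_or, List.find?_cons, List.find?_nil]
      by_cases hk : gmtKey x.2 = k
      · have hbt : (gmtKey x.2 == k) = true := beq_iff_eq.2 hk
        simp [hk]
      · have hbf : (gmtKey x.2 == k) = false := beq_eq_false_iff_ne.2 hk
        have hk' : ¬ k = gmtKey x.2 := fun h => hk h.symm
        simp [hbf, PySem.Dict.getD_insert, hk']

theorem pv_insertBy_nil {α : Type} (before : α → α → Bool) (x : α) :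
    PySem.List.insertBy before x [] = [x] := rfl

theorem pv_insertBy_cons {α : Type} (before : α → α → Bool) (x y : α) (ys : List α) :
    PySem.List.insertBy before x (y :: ys) =
      if before x y then x :: y :: ys else y :: PySem.List.insertBy before x ys := rfl

-- filtering one insertBy step into a key-sorted list
theorem pv_filter_insertBy (x : String × String × String) (ys : List (String × String × String))
    (h : ys.Pairwise (fun a b => a.1 ≤ b.1)) (k : String) :
    (PySem.List.insertBy (fun a b => decide (a.1 < b.1)) x ys).filter (fun t => t.1 == k) =
      if x.1 == k then ys.filter (fun t => t.1 == k) ++ [x] else ys.filter (fun t => t.1 == k) := by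
  induction ys with
  | nil =>
    by_cases hk : x.1 = k
    · have hbt : (x.1 == k) = true := beq_iff_eq.2 hk
      rw [pv_insertBy_nil]
      simp [hbt]
    · have hbf : (x.1 == k) = false := beq_eq_false_iff_ne.2 hk
      rw [pv_insertBy_nil]
      simp [hbf]
  | cons y ys ih =>
    have hpt : ys.Pairwise (fun a b => a.1 ≤ b.1) := (List.pairwise_cons.1 h).2
    have hyz : ∀ z ∈ ys, y.1 ≤ z.1 := (List.pairwise_cons.1 h).1
    rw [pv_insertBy_cons]
    by_cases hlt : x.1 < y.1
    · rw [if_pos (decide_eq_true hlt)]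
      by_cases hk : x.1 = k
      · have hbt : (x.1 == k) = true := beq_iff_eq.2 hk
        have hnil : (y :: ys).filter (fun t => t.1 == k) = [] := by
          rw [List.filter_eq_nil_iff]
          intro z hz hzk
          have hz1 : z.1 = k := by simpa using hzk
          have hyz1 : y.1 ≤ z.1 := by
            rcases List.mem_cons.1 hz with rfl | hz'
            · exact le_refl _
            · exact hyz z hz'
          rw [hz1, ← hk] at hyz1
          exact absurd hyz1 (not_le.2 hlt)
        simp [hbt, hnil]
      · have hbf : (x.1 == k) = false := beq_eq_false_iff_ne.2 hk
        simp [List.filter_cons, hbf]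
    · rw [if_neg (by simpa using hlt)]
      rw [List.filter_cons, ih hpt, List.filter_cons]
      by_cases hk : x.1 = k <;> by_cases hyk : y.1 = k <;>
        simp [beq_iff_eq, hk, hyk]

-- STABILITY of the sort: each key class is preserved in order
theorem pv_sorted_filter (l : List (String × String × String)) (k : String) :
    (PySem.List.sorted l (fun t => t.1)).filter (fun t => t.1 == k) = l.filter (fun t => t.1 == k) := by
  induction l using List.reverseRecOn with
  | nil => rfl
  | append_singleton l x ih =>
    rw [PySem.List.sorted_eq_foldl_insertBy, List.foldl_append]
    simp only [List.foldl_cons, List.foldl_nil]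
    rw [← PySem.List.sorted_eq_foldl_insertBy]
    have hpair : (PySem.List.sorted l (fun t => t.1)).Pairwise (fun a b => a.1 ≤ b.1) :=
      PySem.List.sorted_pairwise l (fun t => t.1)
    rw [pv_filter_insertBy x _ hpair k, List.filter_append, ih]
    by_cases hk : x.1 = k <;> simp [hk]

-- in a ≤-sorted list every member is ≤ the last element
theorem pv_le_getLast (m : List String) (h : m.Pairwise (· ≤ ·)) (a b : String)
    (ha : a ∈ m) (hb : m.getLast? = some b) : a ≤ b := by
  induction m with
  | nil => cases ha
  | cons c m ih =>
    cases m with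
    | nil =>
      have hcb : c = b := by simpa using hb
      exact le_of_eq ((List.mem_singleton.1 ha).trans hcb)
    | cons d' m' =>
      rw [List.getLast?_cons_cons] at hb
      rcases List.mem_cons.1 ha with rfl | ha'
      · exact (List.pairwise_cons.1 h).1 b (List.mem_of_getLast? hb)
      · exact ih (List.pairwise_cons.1 h).2 ha' hb

-- dedup of a ≤-sorted list keeps the last element last
theorem pv_dedup_getLast (m : List String) (h : m.Pairwise (· ≤ ·)) (b : String)
    (hb : m.getLast? = some b) : (PySem.List.dedup m).getLast? = some b := by
  induction m using List.reverseRecOn with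
  | nil => simp at hb
  | append_singleton l a ih =>
    rw [List.getLast?_concat] at hb
    have hab : a = b := by simpa using hb
    have hd : PySem.List.dedup (l ++ [a]) =
        if a ∈ PySem.List.dedup l then PySem.List.dedup l else PySem.List.dedup l ++ [a] := by
      rw [PySem.List.dedup_eq_ofList, PySem.Set.ofList_append_singleton, PySem.Set.add_eq_ite,
        PySem.List.dedup_eq_ofList]
    by_cases hm : a ∈ PySem.List.dedup l
    · have hal : a ∈ l := (PySem.List.mem_dedup l a).1 hm
      have hlp : l.Pairwise (· ≤ ·) := (List.pairwise_append.1 h).1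
      have hne : l ≠ [] := by rintro rfl; cases hal
      cases hc : l.getLast? with
      | none => exact absurd (List.getLast?_eq_none_iff.1 hc) hne
      | some c =>
        have hca : c ≤ a := (List.pairwise_append.1 h).2.2 c (List.mem_of_getLast? hc) a (by simp)
        have hac : a ≤ c := pv_le_getLast l hlp a c hal hc
        have hcb : c = b := (le_antisymm hca hac).trans hab
        rw [hd, if_pos hm]
        exact ih hlp (hcb ▸ hc)
    · rw [hd, if_neg hm, List.getLast?_concat, hab]

-- dedup of a ≤-sorted list is strictly sorted
theorem pv_dedup_lt (m : List String) (h : m.Pairwise (· ≤ ·)) :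
    (PySem.List.dedup m).Pairwise (· < ·) := by
  induction m using List.reverseRecOn with
  | nil => simp [PySem.List.dedup_eq_ofList, PySem.Set.ofList_nil]
  | append_singleton l a ih =>
    have hlp : l.Pairwise (· ≤ ·) := (List.pairwise_append.1 h).1
    have hd : PySem.List.dedup (l ++ [a]) =
        if a ∈ PySem.List.dedup l then PySem.List.dedup l else PySem.List.dedup l ++ [a] := by
      rw [PySem.List.dedup_eq_ofList, PySem.Set.ofList_append_singleton, PySem.Set.add_eq_ite,
        PySem.List.dedup_eq_ofList]
    by_cases hm : a ∈ PySem.List.dedup l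
    · rw [hd, if_pos hm]; exact ih hlp
    · rw [hd, if_neg hm, List.pairwise_append]
      refine ⟨ih hlp, List.pairwise_singleton _ _, ?_⟩
      intro y hy z hz
      rw [List.mem_singleton] at hz
      subst hz
      have hyl : y ∈ l := (PySem.List.mem_dedup l y).1 hy
      have hya : y ≤ z := (List.pairwise_append.1 h).2.2 y hyl z (by simp)
      exact lt_of_le_of_ne hya (fun he => hm (he ▸ (PySem.List.mem_dedup l y).2 hyl))

theorem pvStep_overwrite (res : List (String × String)) (prev : Option String)
    (t : String × String × String) (h1 : res ≠ []) (h2 : prev = some t.1) :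
    pvStep (res, prev) t = (res.dropLast ++ [(t.2.1, t.2.2)], some t.1) := by
  unfold pvStep
  rw [if_pos ⟨h1, h2⟩]

theorem pvStep_append (res : List (String × String)) (prev : Option String)
    (t : String × String × String) (h : ¬ (res ≠ [] ∧ prev = some t.1)) :
    pvStep (res, prev) t = (res ++ [(t.2.1, t.2.2)], some t.1) := by
  unfold pvStep
  rw [if_neg h]

theorem pvF_append_ne (l : List (String × String × String)) (t : String × String × String)
    (k : String) (hk : k ≠ t.1) : pvF (l ++ [t]) k = pvF l k := by
  unfold pvF
  have ht : List.filter (fun x => x.1 == k) [t] = [] := by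
    simp [beq_eq_false_iff_ne.2 (fun h => hk h.symm)]
  rw [List.filter_append, ht, List.append_nil]

theorem pvF_append_self (l : List (String × String × String)) (t : String × String × String) :
    pvF (l ++ [t]) t.1 = t.2 := by
  unfold pvF
  have ht : List.filter (fun x => x.1 == t.1) [t] = [t] := by simp
  rw [List.filter_append, ht, List.getLast?_concat]
  rfl

-- the adjacency scan of a key-sorted list computes pvSpec (and tracks the last key)
theorem pv_scan (l : List (String × String × String)) (h : l.Pairwise (fun a b => a.1 ≤ b.1)) :
    l.foldl pvStep ([], none) = (pvSpec l, (l.map (·.1)).getLast?) := by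
  induction l using List.reverseRecOn with
  | nil => rfl
  | append_singleton l t ih =>
    have hp : l.Pairwise (fun a b => a.1 ≤ b.1) := (List.pairwise_append.1 h).1
    have hall : ∀ z ∈ l, z.1 ≤ t.1 := fun z hz => (List.pairwise_append.1 h).2.2 z hz t (by simp)
    have hpk : (l.map (·.1)).Pairwise (· ≤ ·) :=
      List.Pairwise.map (fun t : String × String × String => t.1) (fun a b hab => hab) hp
    rw [List.foldl_append, ih hp]
    simp only [List.foldl_cons, List.foldl_nil]
    have hmap : (l ++ [t]).map (·.1) = l.map (·.1) ++ [t.1] := by simp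
    have hlastR : ((l ++ [t]).map (·.1)).getLast? = some t.1 := by
      rw [hmap, List.getLast?_concat]
    have hddA : PySem.List.dedup (l.map (·.1) ++ [t.1]) =
        if t.1 ∈ PySem.List.dedup (l.map (·.1)) then PySem.List.dedup (l.map (·.1))
        else PySem.List.dedup (l.map (·.1)) ++ [t.1] := by
      rw [PySem.List.dedup_eq_ofList, PySem.Set.ofList_append_singleton, PySem.Set.add_eq_ite,
        PySem.List.dedup_eq_ofList]
    by_cases hlast : (l.map (·.1)).getLast? = some t.1
    · -- run continues: the scan overwrites the previous entry
      have htmem : t.1 ∈ l.map (·.1) := List.mem_of_getLast? hlast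
      have hdl : (PySem.List.dedup (l.map (·.1))).getLast? = some t.1 :=
        pv_dedup_getLast _ hpk _ hlast
      obtain ⟨D, hD⟩ := List.getLast?_eq_some_iff.1 hdl
      have hplt := pv_dedup_lt _ hpk
      rw [hD] at hplt
      have hDnotin : t.1 ∉ D := fun hmem =>
        lt_irrefl _ ((List.pairwise_append.1 hplt).2.2 t.1 hmem t.1 (by simp))
      have e1 : pvSpec (l ++ [t]) = (D ++ [t.1]).map (pvF (l ++ [t])) := by
        unfold pvSpec
        rw [hmap, hddA, if_pos ((PySem.List.mem_dedup _ _).2 htmem), hD]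
      have e2 : D.map (pvF (l ++ [t])) = D.map (pvF l) :=
        List.map_congr_left (fun k hkD => pvF_append_ne l t k (fun he => hDnotin (he ▸ hkD)))
      have e3 : pvSpec l = D.map (pvF l) ++ [pvF l t.1] := by
        unfold pvSpec
        rw [hD, List.map_append, List.map_singleton]
      have hne : pvSpec l ≠ [] := by rw [e3]; simp
      have hfst : (pvSpec l).dropLast ++ [(t.2.1, t.2.2)] = pvSpec (l ++ [t]) := by
        rw [e1, List.map_append, List.map_singleton, e2, pvF_append_self]
        rw [e3, List.dropLast_concat]
      rw [hlast, pvStep_overwrite _ _ _ hne rfl, hlastR, hfst]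
    · -- new key: the scan appends
      have htnot : t.1 ∉ l.map (·.1) := by
        intro hmem
        cases hlc : (l.map (·.1)).getLast? with
        | none =>
          rw [List.getLast?_eq_none_iff] at hlc
          rw [hlc] at hmem
          cases hmem
        | some c =>
          have h1 : t.1 ≤ c := pv_le_getLast _ hpk _ _ hmem hlc
          have h2 : c ≤ t.1 := by
            obtain ⟨z, hz, hzc⟩ := List.mem_map.1 (List.mem_of_getLast? hlc)
            exact hzc ▸ hall z hz
          exact hlast (hlc.trans (congrArg some (le_antisymm h2 h1)))
      have hddB : PySem.List.dedup ((l ++ [t]).map (·.1)) =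
          PySem.List.dedup (l.map (·.1)) ++ [t.1] := by
        rw [hmap, hddA, if_neg (fun hmem => htnot ((PySem.List.mem_dedup _ _).1 hmem))]
      have e2 : (PySem.List.dedup (l.map (·.1))).map (pvF (l ++ [t])) =
          (PySem.List.dedup (l.map (·.1))).map (pvF l) :=
        List.map_congr_left
          (fun k hkD => pvF_append_ne l t k
            (fun he => htnot (he ▸ (PySem.List.mem_dedup _ _).1 hkD)))
      have hfst : pvSpec l ++ [(t.2.1, t.2.2)] = pvSpec (l ++ [t]) := by
        unfold pvSpec
        rw [hddB, List.map_append, List.map_singleton, e2, pvF_append_self]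
      rw [pvStep_append _ _ _ (fun hc => hlast hc.2), hlastR, hfst]

-- ===== VERDICT (by name: the statement is the Claim_ definition above) =====
theorem gmtSort_spec : Claim_equal_gmtSort := by
  intro zones _hdom
  unfold Spec_gmtSort
  rw [pv_alt_eq,
    pv_scan (PySem.List.sorted (zones.map pvG) (fun t => t.1))
      (PySem.List.sorted_pairwise (zones.map pvG) (fun t => t.1))]
  show (PySem.List.sorted
        (zones.foldl (fun d p => d.insert (gmtKey p.2) (p.1, p.2)) PySem.Dict.empty).keys
        (fun k => k)).map
      (fun x => (zones.foldl (fun d p => d.insert (gmtKey p.2) (p.1, p.2)) PySem.Dict.empty).getD x ("", ""))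
    = pvSpec (PySem.List.sorted (zones.map pvG) (fun t => t.1))
  have hkeys : (zones.foldl (fun d p => d.insert (gmtKey p.2) (p.1, p.2)) PySem.Dict.empty).keys
      = PySem.Set.ofList (zones.map (fun p => gmtKey p.2)) := by
    have h1 := PySem.Dict.keys_foldl_insert_key (ν := String × String) zones
      (fun p => gmtKey p.2) (fun _ p => (p.1, p.2)) PySem.Dict.empty
    rw [PySem.Dict.keys_empty, PySem.Set.update_nil_left] at h1
    exact h1
  have hmm : (zones.map pvG).map (·.1) = zones.map (fun p => gmtKey p.2) := by
    rw [List.map_map]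
    exact List.map_congr_left (fun p _ => rfl)
  have hperm : (PySem.List.dedup ((PySem.List.sorted (zones.map pvG) (fun t => t.1)).map (·.1))).Perm
      (PySem.Set.ofList (zones.map (fun p => gmtKey p.2))) := by
    rw [List.perm_ext_iff_of_nodup (PySem.List.nodup_dedup _) (PySem.Set.nodup_ofList _)]
    intro a
    rw [PySem.List.mem_dedup, PySem.Set.mem_ofList]
    have hmp : ((PySem.List.sorted (zones.map pvG) (fun t => t.1)).map (·.1)).Perm
        ((zones.map pvG).map (·.1)) :=
      (PySem.List.sorted_perm (zones.map pvG) (fun t => t.1) false).map (·.1)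
    rw [hmm] at hmp
    exact hmp.mem_iff
  have hlt : (PySem.List.dedup ((PySem.List.sorted (zones.map pvG) (fun t => t.1)).map (·.1))).Pairwise (· < ·) :=
    pv_dedup_lt _ (PySem.List.sorted_map_key_pairwise (zones.map pvG) (fun t => t.1))
  have hsorted : PySem.List.sorted (PySem.Set.ofList (zones.map (fun p => gmtKey p.2))) (fun k => k)
      = PySem.List.dedup ((PySem.List.sorted (zones.map pvG) (fun t => t.1)).map (·.1)) :=
    PySem.List.sorted_eq_of_perm_of_pairwise_lt _ _ _ hperm hlt
  have hgetD : ∀ k, (zones.foldl (fun d p => d.insert (gmtKey p.2) (p.1, p.2)) PySem.Dict.empty).getD k ("", "")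
      = pvF (PySem.List.sorted (zones.map pvG) (fun t => t.1)) k := by
    intro k
    have hfil : (PySem.List.sorted (zones.map pvG) (fun t => t.1)).filter (fun t => t.1 == k)
        = (zones.filter (fun p => gmtKey p.2 == k)).map pvG := by
      rw [pv_sorted_filter, List.filter_map]
      exact congrArg (List.map pvG) (List.filter_congr (fun p _ => rfl))
    rw [pv_getD_foldl, pv_findrev]
    unfold pvF
    rw [hfil, List.getLast?_map, Option.map_map]
    cases hcl : (zones.filter (fun p => gmtKey p.2 == k)).getLast? with
    | none => simp [PySem.Dict.getD_empty]
    | some p => rfl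
  rw [hkeys, hsorted]
  unfold pvSpec
  exact List.map_congr_left (fun k _ => hgetD k)
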